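-- pv_equiv track=rewrite | github.com/fractalate/atb-elite | lib/text.py | streamPositionedCharacters
-- ===== SOURCE A (Python) =====
-- def streamPositionedCharacters(text: str):
--     # XXX: This could have a pre-processed text wrapping integrated with it? Or just having one available would be helpful?
--     x, y = 0, 0
--     for c in text:
--         if c == '\n':
--             x = 0
--             y += 1
--         else:
--             yield x, y, c
--             x += 1
-- ===== SOURCE B (Python) =====
-- def streamPositionedCharacters(text: str):
--     for y, line in enumerate(text.split('\n')):
--         for x, c in enumerate(line):
--             yield x, y, c
-- ===== Notes on version B (the rewrite author's own statement) =====
-- stated objective: idiomatic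
-- what changed: Replaces the single flat pass with manual x/y counter state by a two-level traversal: split the text into lines once, then nested enumerate over lines and characters.
import Mathlib
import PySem

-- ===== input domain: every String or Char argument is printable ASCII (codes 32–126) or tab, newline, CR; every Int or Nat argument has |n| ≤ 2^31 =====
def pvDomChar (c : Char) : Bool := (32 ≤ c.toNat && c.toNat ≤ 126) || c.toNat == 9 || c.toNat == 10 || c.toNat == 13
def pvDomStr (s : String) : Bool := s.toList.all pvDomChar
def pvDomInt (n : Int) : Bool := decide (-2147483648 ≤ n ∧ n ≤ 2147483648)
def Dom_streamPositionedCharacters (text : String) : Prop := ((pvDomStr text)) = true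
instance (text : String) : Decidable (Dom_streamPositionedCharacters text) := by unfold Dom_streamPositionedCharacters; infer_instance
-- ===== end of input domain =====

-- B yields the same triples via text.split('\n') and a nested enumerate instead of A's
-- flat pass with manual x/y counters; return-value equivalence only (both are generators).

-- ===== PORT A =====
-- the flat loop over the characters with state (x, y)
def pvGoA : List Char → Int → Int → List (Int × Int × String)
  | [], _, _ => []
  | c :: cs, x, y =>
    if c = '\n' then pvGoA cs 0 (y + 1)
    else (x, y, String.ofList [c]) :: pvGoA cs (x + 1) y

def streamPositionedCharacters (text : String) : List (Int × Int × String) :=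
  pvGoA text.toList 0 0

-- ===== PORT B =====
-- hand port of text.split('\n') for the single-character separator '\n'; exact:
-- Python's str.split with a one-char separator cuts at every occurrence, keeping empty pieces.
def pvSplitNl : List Char → List (List Char)
  | [] => [[]]
  | c :: cs =>
    if c = '\n' then [] :: pvSplitNl cs
    else ((c :: (pvSplitNl cs).headI) :: (pvSplitNl cs).tail)

def streamPositionedCharacters_alt (text : String) : List (Int × Int × String) :=
  (PySem.List.enumerate (pvSplitNl text.toList)).flatMap fun yl =>
    (PySem.List.enumerate yl.2).map fun xc => (xc.1, yl.1, String.ofList [xc.2])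

-- ===== PRECONDITION & SPEC =====
def Spec_streamPositionedCharacters (text : String) (out : List (Int × Int × String)) : Prop := out = streamPositionedCharacters_alt text
instance (text : String) (out : List (Int × Int × String)) : Decidable (Spec_streamPositionedCharacters text out) := by unfold Spec_streamPositionedCharacters; infer_instance

-- ===== CLAIM (what is proved, stated in full; the proofs are below) =====
def Claim_equal_streamPositionedCharacters : Prop := ∀ (text : String), Dom_streamPositionedCharacters text → Spec_streamPositionedCharacters text (streamPositionedCharacters text)

-- ===== LEMMAS AND PROOFS =====

-- the common shape: emit the (partially consumed) first line from column x, later lines from 0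
def pvEmit : List (List Char) → Int → Int → List (Int × Int × String)
  | [], _, _ => []
  | l :: ls, x, y =>
    ((PySem.List.enumerate l x).map fun xc => (xc.1, y, String.ofList [xc.2])) ++ pvEmit ls 0 (y + 1)

theorem pvSplitNl_ne_nil (cs : List Char) : pvSplitNl cs ≠ [] := by
  cases cs with
  | nil => simp [pvSplitNl]
  | cons c cs => by_cases h : c = '\n' <;> simp [pvSplitNl, h]

theorem pvGoA_eq_emit (cs : List Char) (x y : Int) :
    pvGoA cs x y = pvEmit (pvSplitNl cs) x y := by
  induction cs generalizing x y with
  | nil => simp [pvGoA, pvSplitNl, pvEmit]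
  | cons c cs ih =>
    by_cases h : c = '\n'
    · simp [pvGoA, pvSplitNl, h, pvEmit, ih]
    · have hne := pvSplitNl_ne_nil cs
      rw [show pvSplitNl cs = (pvSplitNl cs).headI :: (pvSplitNl cs).tail by
        cases h' : pvSplitNl cs with
        | nil => exact absurd h' hne
        | cons a t => rfl] at ih
      simp [pvGoA, pvSplitNl, h, pvEmit, ih, PySem.List.enumerate_cons]

theorem pvFlatMap_eq_emit (ls : List (List Char)) (y : Int) :
    ((PySem.List.enumerate ls y).flatMap fun yl =>
      (PySem.List.enumerate yl.2).map fun xc => (xc.1, yl.1, String.ofList [xc.2]))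
    = pvEmit ls 0 y := by
  induction ls generalizing y with
  | nil => simp [pvEmit, PySem.List.enumerate]
  | cons l ls ih => simp [pvEmit, PySem.List.enumerate_cons, ih]

-- ===== VERDICT (by name: the statement is the Claim_ definition above) =====
theorem streamPositionedCharacters_spec : Claim_equal_streamPositionedCharacters := by
  intro text _
  unfold Spec_streamPositionedCharacters streamPositionedCharacters streamPositionedCharacters_alt
  rw [pvGoA_eq_emit, pvFlatMap_eq_emit]
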